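-- pv_equiv track=rewrite | github.com/Gikouu/Exercicios | code_1.py | encontra_impares
-- ===== SOURCE A (Python) =====
-- def encontra_impares(lista):
--
--     if not lista:
--         return []
--
--     impares_restantes = encontra_impares(lista[1:])
--     if lista[0] % 2 != 0:
--         return impares_restantes + [lista[0]]
--     else:
--         return impares_restantes
-- ===== SOURCE B (Python) =====
-- def encontra_impares(lista):
--     result = []
--     for x in reversed(lista):
--         if x % 2 != 0:
--             result.append(x)
--     return result
-- ===== Notes on version B (the rewrite author's own statement) =====
-- stated objective: faster
-- what changed: Replaces the quadratic recursion (slice copy plus list concatenation per element) with a single iterative pass over reversed(lista) appending odds.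
import Mathlib
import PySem

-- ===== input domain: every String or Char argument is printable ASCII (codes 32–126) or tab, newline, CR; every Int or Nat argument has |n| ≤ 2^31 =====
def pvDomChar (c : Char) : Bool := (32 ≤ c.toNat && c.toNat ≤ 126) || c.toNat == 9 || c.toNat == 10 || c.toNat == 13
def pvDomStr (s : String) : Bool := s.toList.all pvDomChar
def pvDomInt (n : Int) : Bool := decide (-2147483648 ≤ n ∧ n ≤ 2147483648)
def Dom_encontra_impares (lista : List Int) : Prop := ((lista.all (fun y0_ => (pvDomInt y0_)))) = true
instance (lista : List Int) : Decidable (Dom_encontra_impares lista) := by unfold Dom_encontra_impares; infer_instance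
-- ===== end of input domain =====

-- B replaces A's recursion (tail slice, recurse, append head) with one iterative pass over the
-- reversed list appending odd elements; return value only, no mutation observable.

-- ===== PORT A =====
def encontra_impares (lista : List Int) : List Int :=
  match lista with
  | [] => []
  | x :: xs =>
    let impares_restantes := encontra_impares xs   -- lista[1:] is the tail
    if PySem.Int.mod x 2 ≠ 0 then impares_restantes ++ [x] else impares_restantes

-- ===== PORT B =====
def encontra_impares_alt (lista : List Int) : List Int :=
  lista.reverse.foldl (fun result x => if PySem.Int.mod x 2 ≠ 0 then result ++ [x] else result) []

-- ===== PRECONDITION & SPEC =====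
def Spec_encontra_impares (lista : List Int) (out : List Int) : Prop := out = encontra_impares_alt lista
instance (lista : List Int) (out : List Int) : Decidable (Spec_encontra_impares lista out) := by unfold Spec_encontra_impares; infer_instance

-- ===== CLAIM (what is proved, stated in full; the proofs are below) =====
def Claim_equal_encontra_impares : Prop := ∀ (lista : List Int), Dom_encontra_impares lista → Spec_encontra_impares lista (encontra_impares lista)

-- ===== LEMMAS AND PROOFS =====

lemma encontra_impares_eq_filter_reverse (l : List Int) :
    encontra_impares l = (l.filter (fun x => decide (PySem.Int.mod x 2 ≠ 0))).reverse := by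
  induction l with
  | nil => rfl
  | cons x xs ih =>
    simp only [encontra_impares, List.filter_cons, ih]
    by_cases h : x.fmod 2 = 0 <;> simp [PySem.Int.mod, h]

lemma foldl_append_odds (l acc : List Int) :
    l.foldl (fun result x => if PySem.Int.mod x 2 ≠ 0 then result ++ [x] else result) acc
      = acc ++ l.filter (fun x => decide (PySem.Int.mod x 2 ≠ 0)) := by
  induction l generalizing acc with
  | nil => simp
  | cons x xs ih =>
    rw [List.foldl_cons, ih, List.filter_cons]
    by_cases h : x.fmod 2 = 0 <;> simp [PySem.Int.mod, h]

-- ===== VERDICT (by name: the statement is the Claim_ definition above) =====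
theorem encontra_impares_spec : Claim_equal_encontra_impares := by
  intro lista _
  show encontra_impares lista = encontra_impares_alt lista
  rw [encontra_impares_eq_filter_reverse, encontra_impares_alt, foldl_append_odds]
  simp [List.filter_reverse]
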